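-- pv_equiv track=rewrite | github.com/123R3N321/PTC | legacy/cs1114and1134/leetcode1751.py | q1751
-- ===== SOURCE A (Python) =====
-- def binarySearchLeft(events, capInd):
--     left = 0
--     right = capInd
--     res = -1    #-1 is convenient
--     while left <= right:
--         mid = (left + right) // 2
--         if events[mid][1] < events[capInd][0]:  #indeed ends before current event starting day
--             left = mid+1
--             res = mid
--         else:
--             right = mid - 1
--     return res
--
-- def q1751(events, k):
--     n = len(events)
--     events = sorted(events, key=lambda x: x[1]) #sort by ENDING TIME
--     # create 2D dp table with:
--     #top-bottom: incremental scan of all elements in events arr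
--     #left-right: keep track of subseq of 0,1,2,...,k length
--     #dp table will contain answers to the best solutions for:
--     # pick any length k of events to attend among any in the first n events
--     # we can also, ofc, modify the dp content to backtrack exactly which events are attended
--     # and, ofc, the dp has one dummy row one dummy column at the left-top edges, as usual
--     dp= [[0 for __ in range(k + 1)] for _ in range(n + 1)]
--
--     for i in range(1, n + 1):   #fill row by row left to right
--         prevInd = binarySearchLeft(events, i-1)
--         for j in range(1, k + 1):
--             dp[i][j] = max(dp[i-1][j], dp[prevInd+1][j-1]+events[i-1][2])
--     return dp[n][k]
-- ===== SOURCE B (Python) =====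
-- def q1751(events, k):
--     evs = sorted(events, key=lambda x: x[1])
--     n = len(evs)
--     ends = [e[1] for e in evs]
--     # how many events end strictly before each event's start: one two-pointer
--     # sweep over the events in increasing order of start time
--     byStart = sorted(range(n), key=lambda i: evs[i][0])
--     before = [0] * n
--     ptr = 0
--     for i in byStart:
--         while ptr < n and ends[ptr] < evs[i][0]:
--             ptr += 1
--         before[i] = ptr
--     # rolling 1-D layers: best[i] = best value among the first i events with
--     # at most j picks; recompute the layer k times
--     best = [0] * (n + 1)
--     for _ in range(0, k):
--         nxt = [0]
--         for i in range(1, n + 1):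
--             take = best[min(before[i - 1], i)] + evs[i - 1][2]
--             last = nxt[-1]
--             nxt.append(take if last < take else last)
--         best = nxt
--     return best[n]
-- ===== Notes on version B (the rewrite author's own statement) =====
-- stated objective: alternative
-- what changed: B replaces A's per-row hand-rolled binary search by a single two-pointer sweep over the events in start order (computing all predecessor counts at once) and A's mutated (n+1)x(k+1) table by k passes that rebuild a rolling 1-D layer list.
import Mathlib
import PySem

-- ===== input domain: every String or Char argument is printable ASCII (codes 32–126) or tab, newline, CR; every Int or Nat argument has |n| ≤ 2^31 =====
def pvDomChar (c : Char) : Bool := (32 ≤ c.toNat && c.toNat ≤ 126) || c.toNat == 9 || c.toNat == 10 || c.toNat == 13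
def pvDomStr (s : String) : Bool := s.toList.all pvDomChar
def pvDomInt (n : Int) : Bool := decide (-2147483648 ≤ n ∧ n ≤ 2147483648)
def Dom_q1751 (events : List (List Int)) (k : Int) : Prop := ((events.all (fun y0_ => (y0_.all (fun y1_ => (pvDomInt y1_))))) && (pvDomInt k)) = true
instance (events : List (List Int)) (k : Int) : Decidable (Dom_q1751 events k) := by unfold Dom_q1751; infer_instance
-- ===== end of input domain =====

-- B replaces A's per-row binary search by one two-pointer sweep over the events in
-- start order and A's (n+1)×(k+1) table by k passes over rolling 1-D layers.

-- ===== PORT A =====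

-- the 'while left <= right' loop of binarySearchLeft
def bslLoop (events : List (List Int)) (capInd : Int) (left right res : Int) : Int :=
  if h : left ≤ right then
    let mid := PySem.Int.floordiv (left + right) 2
    if PySem.List.pyGetD (PySem.List.pyGetD events mid []) 1 0 <
        PySem.List.pyGetD (PySem.List.pyGetD events capInd []) 0 0 then
      bslLoop events capInd (mid + 1) right mid
    else
      bslLoop events capInd left (mid - 1) res
  else res
termination_by (right - left + 1).toNat
decreasing_by
  all_goals
    have hb := PySem.Int.floordiv_two_mid_bounds h
    omega

def binarySearchLeft (events : List (List Int)) (capInd : Int) : Int :=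
  bslLoop events capInd 0 capInd (-1)

def q1751 (events : List (List Int)) (k : Int) : Int :=
  let n : Int := events.length
  let evs := PySem.List.sorted events (fun x => PySem.List.pyGetD x 1 0) false
  let dp0 : List (List Int) :=
    (PySem.List.pyRange 0 (n + 1) 1).map (fun _ => (PySem.List.pyRange 0 (k + 1) 1).map (fun _ => (0 : Int)))
  let dp := (PySem.List.pyRange 1 (n + 1) 1).foldl (fun dp i =>
      let prevInd := binarySearchLeft evs (i - 1)
      (PySem.List.pyRange 1 (k + 1) 1).foldl (fun dp j =>
        let v := max (PySem.List.pyGetD (PySem.List.pyGetD dp (i - 1) []) j 0)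
                     (PySem.List.pyGetD (PySem.List.pyGetD dp (prevInd + 1) []) (j - 1) 0 +
                       PySem.List.pyGetD (PySem.List.pyGetD evs (i - 1) []) 2 0)
        PySem.List.pySetD dp i (PySem.List.pySetD (PySem.List.pyGetD dp i []) j v)) dp) dp0
  PySem.List.pyGetD (PySem.List.pyGetD dp n []) k 0

-- ===== PORT B =====

-- the 'while ptr < n and ends[ptr] < s' advance of the sweep
def sweepWhile (ends : List Int) (s n ptr : Int) : Int :=
  if h : ptr < n ∧ PySem.List.pyGetD ends ptr 0 < s then sweepWhile ends s n (ptr + 1) else ptr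
termination_by (n - ptr).toNat
decreasing_by omega

def q1751_alt (events : List (List Int)) (k : Int) : Int :=
  let evs := PySem.List.sorted events (fun x => PySem.List.pyGetD x 1 0) false
  let n : Int := evs.length
  let ends := evs.map (fun e => PySem.List.pyGetD e 1 0)
  let byStart := PySem.List.sorted (PySem.List.pyRange 0 n 1)
      (fun i => PySem.List.pyGetD (PySem.List.pyGetD evs i []) 0 0) false
  let st := byStart.foldl (fun (st : List Int × Int) i =>
      let p := sweepWhile ends (PySem.List.pyGetD (PySem.List.pyGetD evs i []) 0 0) n st.2
      (PySem.List.pySetD st.1 i p, p))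
    ((PySem.List.pyRange 0 n 1).map (fun _ => (0 : Int)), 0)
  let before := st.1
  let best0 : List Int := (PySem.List.pyRange 0 (n + 1) 1).map (fun _ => (0 : Int))
  let best := (PySem.List.pyRange 0 k 1).foldl (fun best _ =>
      (PySem.List.pyRange 1 (n + 1) 1).foldl (fun nxt i =>
        let take := PySem.List.pyGetD best (min (PySem.List.pyGetD before (i - 1) 0) i) 0 +
                      PySem.List.pyGetD (PySem.List.pyGetD evs (i - 1) []) 2 0
        let last := PySem.List.pyGetD nxt (-1) 0
        nxt ++ [if last < take then take else last]) [0]) best0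
  PySem.List.pyGetD best n 0

-- ===== PRECONDITION & SPEC =====
-- Pre_ excludes exactly the inputs on which Python A raises: a negative k
-- (dp rows are then empty and dp[n][k] is an IndexError), an event of fewer than
-- 2 entries (the sort key / binary search read e[1]), and, when k ≥ 1, an event of
-- fewer than 3 entries (the dp body reads e[2]).
def Pre_q1751 (events : List (List Int)) (k : Int) : Prop :=
  0 ≤ k ∧ (∀ e ∈ events, 2 ≤ e.length) ∧ (1 ≤ k → ∀ e ∈ events, 3 ≤ e.length)
instance (events : List (List Int)) (k : Int) : Decidable (Pre_q1751 events k) := by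
  unfold Pre_q1751; infer_instance

def pvWitness_q1751 : List (List Int) × Int := ([[1, 3, 4], [2, 5, 6], [4, 7, 2]], 2)

def Spec_q1751 (events : List (List Int)) (k : Int) (out : Int) : Prop := out = q1751_alt events k
instance (events : List (List Int)) (k : Int) (out : Int) : Decidable (Spec_q1751 events k out) := by
  unfold Spec_q1751; infer_instance

-- ===== CLAIM (what is proved, stated in full; the proofs are below) =====
def Claim_equal_q1751 : Prop := ∀ (events : List (List Int)) (k : Int),
  Dom_q1751 events k → Pre_q1751 events k → Spec_q1751 events k (q1751 events k)

-- ===== LEMMAS AND PROOFS =====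

-- The shared sort key (both Pythons sort by `lambda x: x[1]`).
def evKey (x : List Int) : Int := PySem.List.pyGetD x 1 0

-- end / start / value of the c-th event of the sorted list (getD form; indices the
-- ports reach are non-negative, where pyGetD agrees with getD)
def endA (evs : List (List Int)) (c : Nat) : Int := evKey (evs.getD c [])
def stA (evs : List (List Int)) (c : Nat) : Int := (evs.getD c []).getD 0 0
def vlA (evs : List (List Int)) (c : Nat) : Int := (evs.getD c []).getD 2 0

-- number of events (a prefix, once sorted by end) whose end is < s
def Kc (evs : List (List Int)) (s : Int) : Nat :=
  (evs.takeWhile (fun e => decide (evKey e < s))).length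

-- the dp row index both programs feed the 'take' branch for event c
def pIdx (evs : List (List Int)) (c : Nat) : Nat := min (Kc evs (stA evs c)) (c + 1)

-- the common recurrence: F i j = best value among the first i events with ≤ j picks
def F (evs : List (List Int)) : Nat → Nat → Int
  | 0, _ => 0
  | _ + 1, 0 => 0
  | i + 1, j + 1 => max (F evs i (j + 1)) (F evs (pIdx evs i) j + vlA evs i)
termination_by i j => (j, i)


-- ---- bridging: pyGetD at a non-negative Int index is getD ----
theorem pyGetD_nonneg {α : Type} (xs : List α) (i : Int) (d : α) (h : 0 ≤ i) :
    PySem.List.pyGetD xs i d = xs.getD i.toNat d := by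
  obtain ⟨m, rfl⟩ := Int.eq_ofNat_of_zero_le h
  simp

-- ---- facts about takeWhile used to characterise Kc ----
theorem tw_true (l : List (List Int)) (p : List Int → Bool) (m : Nat)
    (h : m < (l.takeWhile p).length) : ∃ hm : m < l.length, p l[m] = true := by
  induction l generalizing m with
  | nil => simp at h
  | cons x xs ih =>
    by_cases hx : p x
    · simp only [List.takeWhile_cons, hx, if_true, List.length_cons] at h
      cases m with
      | zero => exact ⟨by simp, by simpa using hx⟩
      | succ m =>
        obtain ⟨hm, hp⟩ := ih m (by simpa using h)
        exact ⟨by simpa using hm, by simpa using hp⟩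
    · simp [hx] at h

theorem tw_first_false (l : List (List Int)) (p : List Int → Bool)
    (h : (l.takeWhile p).length < l.length) : p (l[(l.takeWhile p).length]'h) = false := by
  induction l with
  | nil => simp at h
  | cons x xs ih =>
    by_cases hx : p x
    · simp only [List.takeWhile_cons, hx, if_true, List.length_cons] at h ⊢
      simpa using ih (by omega)
    · simp only [List.takeWhile_cons, hx] at h ⊢
      simpa using hx

-- ---- the sorted list has non-decreasing ends ----
def EndMono (evs : List (List Int)) : Prop :=
  ∀ p q : Nat, p ≤ q → q < evs.length → endA evs p ≤ endA evs q

theorem endMono_sorted (events : List (List Int)) :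
    EndMono (PySem.List.sorted events (fun x => PySem.List.pyGetD x 1 0) false) := by
  intro p q hpq hq
  have hle : p < (PySem.List.sorted events (fun x => PySem.List.pyGetD x 1 0) false).length := by omega
  unfold endA evKey
  rw [List.getD_eq_getElem _ _ hle, List.getD_eq_getElem _ _ hq]
  exact PySem.List.key_sorted_getElem_mono events (fun x => PySem.List.pyGetD x 1 0) hpq hq

-- ---- characterisation of Kc ----
theorem Kc_le (evs : List (List Int)) (s : Int) : Kc evs s ≤ evs.length :=
  (List.takeWhile_prefix _).length_le

theorem endA_lt_of_lt_Kc {evs : List (List Int)} {s : Int} {m : Nat} (h : m < Kc evs s) :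
    m < evs.length ∧ endA evs m < s := by
  obtain ⟨hm, hp⟩ := tw_true evs _ m h
  refine ⟨hm, ?_⟩
  have : evKey evs[m] < s := by simpa using hp
  unfold endA
  rwa [List.getD_eq_getElem _ _ hm]

theorem not_endA_lt_Kc {evs : List (List Int)} {s : Int} (h : Kc evs s < evs.length) :
    ¬ endA evs (Kc evs s) < s := by
  have := tw_first_false evs (fun e => decide (evKey e < s)) h
  unfold endA
  rw [List.getD_eq_getElem _ _ h]
  simpa using this

theorem lt_Kc_of_endA_lt {evs : List (List Int)} (hmono : EndMono evs) {s : Int} {m : Nat}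
    (hm : m < evs.length) (h : endA evs m < s) : m < Kc evs s := by
  by_contra hK
  push Not at hK
  have hKlen : Kc evs s < evs.length := by omega
  exact not_endA_lt_Kc hKlen (lt_of_le_of_lt (hmono _ _ hK hm) h)

theorem Kc_mono {evs : List (List Int)} (hmono : EndMono evs) {s s' : Int} (h : s ≤ s') :
    Kc evs s ≤ Kc evs s' := by
  rcases Nat.eq_zero_or_pos (Kc evs s) with h0 | h0
  · omega
  · obtain ⟨hm, hlt⟩ := endA_lt_of_lt_Kc (Nat.sub_one_lt_of_le h0 le_rfl |>.trans_le le_rfl)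
    have := lt_Kc_of_endA_lt hmono hm (lt_of_lt_of_le hlt h)
    omega


-- ---- B's while loop advances the pointer exactly to Kc ----
theorem sweepWhile_eq {evs : List (List Int)} (hmono : EndMono evs) (s : Int)
    {ends : List Int} (hends : ends = evs.map (fun e => PySem.List.pyGetD e 1 0))
    {n : Int} (hn : n = (evs.length : Int)) :
    ∀ (N : Nat) (ptr : Int), (n - ptr).toNat ≤ N → 0 ≤ ptr → ptr ≤ (Kc evs s : Int) →
      sweepWhile ends s n ptr = (Kc evs s : Int) := by
  have hKle := Kc_le evs s
  intro N
  induction N with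
  | zero =>
    intro ptr hN h0 hK
    rw [sweepWhile]
    rw [dif_neg (by omega)]
    omega
  | succ N ih =>
    intro ptr hN h0 hK
    rw [sweepWhile]
    by_cases hlt : ptr < n
    · have hplen : ptr.toNat < evs.length := by omega
      have hgd : PySem.List.pyGetD ends ptr 0 = endA evs ptr.toNat := by
        rw [pyGetD_nonneg ends ptr 0 h0, hends]
        rw [List.getD_eq_getElem _ _ (by simpa using hplen)]
        simp [List.getElem_map, endA, evKey, List.getD, List.getElem?_eq_getElem hplen]
      by_cases hend : PySem.List.pyGetD ends ptr 0 < s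
      · rw [dif_pos ⟨hlt, hend⟩]
        have : ptr.toNat < Kc evs s := lt_Kc_of_endA_lt hmono hplen (by rwa [hgd] at hend)
        exact ih (ptr + 1) (by omega) (by omega) (by omega)
      · rw [dif_neg (by tauto)]
        have : Kc evs s ≤ ptr.toNat := by
          by_contra hx
          push Not at hx
          exact hend (by rw [hgd]; exact (endA_lt_of_lt_Kc hx).2)
        omega
    · rw [dif_neg (by tauto)]
      omega

-- ---- the sweep over the start-sorted indices fills `before` with Kc values ----
theorem sweep_fold {evs : List (List Int)} (hmono : EndMono evs)
    {ends : List Int} (hends : ends = evs.map (fun e => PySem.List.pyGetD e 1 0))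
    {n : Int} (hn : n = (evs.length : Int)) :
    ∀ (rest : List Int) (cnt : List Int) (ptr : Int),
      cnt.length = evs.length →
      (∀ j ∈ rest, 0 ≤ j ∧ j < n) →
      rest.Pairwise (fun a b => stA evs a.toNat ≤ stA evs b.toNat) →
      0 ≤ ptr →
      (∀ j ∈ rest, ptr ≤ (Kc evs (stA evs j.toNat) : Int)) →
      ∀ m : Nat, m < evs.length →
        ((rest.foldl (fun (st : List Int × Int) i =>
            (PySem.List.pySetD st.1 i (sweepWhile ends (PySem.List.pyGetD (PySem.List.pyGetD evs i []) 0 0) n st.2),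
             sweepWhile ends (PySem.List.pyGetD (PySem.List.pyGetD evs i []) 0 0) n st.2)) (cnt, ptr)).1.getD m 0 =
          (if (m : Int) ∈ rest then (Kc evs (stA evs m) : Int) else cnt.getD m 0)) := by
  intro rest
  induction rest with
  | nil => intro cnt ptr _ _ _ _ _ m _; simp
  | cons j rest' ih =>
    intro cnt ptr hlen hmem hpair h0 hptr m hm
    obtain ⟨hj0, hjn⟩ := hmem j List.mem_cons_self
    have hst : PySem.List.pyGetD (PySem.List.pyGetD evs j []) 0 0 = stA evs j.toNat := by
      rw [pyGetD_nonneg evs j [] hj0]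
      simp [stA, PySem.List.pyGetD_zero]
    have hp : sweepWhile ends (PySem.List.pyGetD (PySem.List.pyGetD evs j []) 0 0) n ptr
        = (Kc evs (stA evs j.toNat) : Int) := by
      rw [hst]
      exact sweepWhile_eq hmono _ hends hn (n - ptr).toNat ptr le_rfl h0
        (hptr j List.mem_cons_self)
    rw [List.foldl_cons]
    simp only [hp]
    have hpair' := List.pairwise_cons.mp hpair
    have hres := ih (PySem.List.pySetD cnt j (Kc evs (stA evs j.toNat) : Int))
      (Kc evs (stA evs j.toNat) : Int)
      (by rw [PySem.List.length_pySetD]; exact hlen)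
      (fun x hx => hmem x (List.mem_cons_of_mem _ hx))
      hpair'.2
      (by omega)
      (fun x hx => by
        have := Kc_mono hmono (hpair'.1 x hx)
        omega)
      m hm
    rw [hres]
    by_cases hmr : (m : Int) ∈ rest'
    · rw [if_pos hmr, if_pos (List.mem_cons_of_mem _ hmr)]
    · rw [if_neg hmr]
      by_cases hmj : (m : Int) = j
      · rw [if_pos (by rw [hmj]; exact List.mem_cons_self)]
        rw [PySem.List.pySetD_of_nonneg _ _ hj0]
        have hjm : j.toNat = m := by omega
        rw [hjm]
        have hmc : m < cnt.length := by omega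
        simp [List.getD, hmc]
      · rw [if_neg (by simp [hmj, hmr])]
        rw [PySem.List.pySetD_of_nonneg _ _ hj0]
        have hne : j.toNat ≠ m := by omega
        simp [List.getD, List.getElem?_set_ne hne]


-- ---- A's binary search returns pIdx - 1 ----
theorem bslLoop_eq {evs : List (List Int)} (hmono : EndMono evs) (c : Nat) (hc : c < evs.length) :
    ∀ (N : Nat) (left right res : Int), (right - left + 1).toNat ≤ N →
      0 ≤ left → right ≤ (c : Int) →
      left ≤ (pIdx evs c : Int) → (pIdx evs c : Int) ≤ right + 1 →
      res = left - 1 →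
      bslLoop evs (c : Int) left right res = (pIdx evs c : Int) - 1 := by
  intro N
  induction N with
  | zero =>
    intro left right res hN h0 hrc hlK hKr hres
    rw [bslLoop]
    rw [dif_neg (by omega)]
    omega
  | succ N ih =>
    intro left right res hN h0 hrc hlK hKr hres
    rw [bslLoop]
    by_cases h : left ≤ right
    · rw [dif_pos h]
      have hmid := PySem.Int.floordiv_two_mid_bounds h
      set mid := PySem.Int.floordiv (left + right) 2 with hmiddef
      have hmid0 : 0 ≤ mid := by omega
      have hmidc : mid.toNat ≤ c := by omega
      have hmidlen : mid.toNat < evs.length := by omega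
      have hcast : (mid.toNat : Int) = mid := by omega
      have hend : PySem.List.pyGetD (PySem.List.pyGetD evs mid []) 1 0 = endA evs mid.toNat := by
        rw [pyGetD_nonneg evs mid [] hmid0]; rfl
      have hst : PySem.List.pyGetD (PySem.List.pyGetD evs (c : Int) []) 0 0 = stA evs c := by
        rw [pyGetD_nonneg evs (c : Int) [] (by omega)]
        simp [stA, PySem.List.pyGetD_zero]
      show (if PySem.List.pyGetD (PySem.List.pyGetD evs mid []) 1 0 <
          PySem.List.pyGetD (PySem.List.pyGetD evs (c : Int) []) 0 0 then
          bslLoop evs (c : Int) (mid + 1) right mid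
        else bslLoop evs (c : Int) left (mid - 1) res) = (pIdx evs c : Int) - 1
      rw [hend, hst]
      by_cases hlt : endA evs mid.toNat < stA evs c
      · rw [if_pos hlt]
        have hK : mid.toNat < Kc evs (stA evs c) := lt_Kc_of_endA_lt hmono hmidlen hlt
        have hKp : mid < (pIdx evs c : Int) := by
          have : mid.toNat < pIdx evs c := by unfold pIdx; omega
          omega
        exact ih (mid + 1) right mid (by omega) (by omega) hrc (by omega) hKr (by omega)
      · rw [if_neg hlt]
        have hK : Kc evs (stA evs c) ≤ mid.toNat := by
          by_contra hx
          push Not at hx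
          exact hlt (endA_lt_of_lt_Kc hx).2
        have hKp : (pIdx evs c : Int) ≤ mid := by
          have : pIdx evs c ≤ Kc evs (stA evs c) := by unfold pIdx; omega
          omega
        exact ih left (mid - 1) res (by omega) h0 (by omega) hlK (by omega) hres
    · rw [dif_neg h]
      omega

theorem binarySearchLeft_eq {evs : List (List Int)} (hmono : EndMono evs) (c : Nat)
    (hc : c < evs.length) : binarySearchLeft evs (c : Int) = (pIdx evs c : Int) - 1 := by
  unfold binarySearchLeft
  exact bslLoop_eq hmono c hc (c + 2) 0 (c : Int) (-1) (by omega) (by omega) (by omega)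
    (by have h1 := Kc_le evs (stA evs c); unfold pIdx; omega)
    (by unfold pIdx; omega) (by omega)

theorem F_zero_right (evs : List (List Int)) (r : Nat) : F evs r 0 = 0 := by
  cases r <;> simp [F]

theorem F_succ_succ (evs : List (List Int)) (i j : Nat) :
    F evs (i + 1) (j + 1) = max (F evs i (j + 1)) (F evs (pIdx evs i) j + vlA evs i) := by
  simp [F]

theorem pIdx_le (evs : List (List Int)) (c : Nat) (hc : c < evs.length) :
    pIdx evs c ≤ evs.length ∧ pIdx evs c ≤ c + 1 := by
  have := Kc_le evs (stA evs c)
  unfold pIdx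
  omega

-- ---- one pass of B's inner loop builds the next layer ----
theorem layer_step {evs : List (List Int)} (before best : List Int) (j : Nat)
    (hbefore : ∀ m : Nat, m < evs.length → before.getD m 0 = (Kc evs (stA evs m) : Int))
    (hbest : best = (List.range (evs.length + 1)).map (fun r => F evs r j)) :
    ∀ i : Nat, i ≤ evs.length →
      ((PySem.List.pyRange 1 ((i : Int) + 1) 1).foldl (fun nxt ii =>
          nxt ++ [if PySem.List.pyGetD nxt (-1) 0 <
              PySem.List.pyGetD best (min (PySem.List.pyGetD before (ii - 1) 0) ii) 0 +
                PySem.List.pyGetD (PySem.List.pyGetD evs (ii - 1) []) 2 0 then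
              PySem.List.pyGetD best (min (PySem.List.pyGetD before (ii - 1) 0) ii) 0 +
                PySem.List.pyGetD (PySem.List.pyGetD evs (ii - 1) []) 2 0
            else PySem.List.pyGetD nxt (-1) 0]) ([0] : List Int)) =
        (List.range (i + 1)).map (fun r => F evs r (j + 1)) := by
  intro i
  induction i with
  | zero =>
    intro _
    rw [PySem.List.pyRange_one_eq_nil (by omega)]
    simp [F]
  | succ i ih =>
    intro hle
    have hilen : i < evs.length := by omega
    rw [show ((i + 1 : Nat) : Int) + 1 = (((i : Int) + 1) + 1) by push_cast; ring]
    rw [PySem.List.pyRange_one_succ_right (by omega)]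
    rw [List.foldl_append, ih (by omega)]
    simp only [List.foldl_cons, List.foldl_nil]
    -- the three reads
    have hb : PySem.List.pyGetD before ((i : Int) + 1 - 1) 0 = (Kc evs (stA evs i) : Int) := by
      rw [show (i : Int) + 1 - 1 = (i : Int) by ring, pyGetD_nonneg before _ 0 (by omega)]
      simpa using hbefore i hilen
    have hmin : min (Kc evs (stA evs i) : Int) ((i : Int) + 1) = (pIdx evs i : Int) := by
      unfold pIdx
      omega
    have hbestread : PySem.List.pyGetD best ((pIdx evs i : Int)) 0 = F evs (pIdx evs i) j := by
      rw [pyGetD_nonneg best _ 0 (by omega), hbest]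
      have hp := pIdx_le evs i hilen
      rw [Int.toNat_natCast]
      exact PySem.List.getD_map_range _ _ _ _ (by omega)
    have hval : PySem.List.pyGetD (PySem.List.pyGetD evs ((i : Int) + 1 - 1) []) 2 0 = vlA evs i := by
      rw [show (i : Int) + 1 - 1 = (i : Int) by ring, pyGetD_nonneg evs _ [] (by omega)]
      rw [pyGetD_nonneg _ 2 0 (by omega)]
      simp [vlA]
    have hlast : PySem.List.pyGetD ((List.range (i + 1)).map (fun r => F evs r (j + 1))) (-1) 0 =
        F evs i (j + 1) := by
      rw [PySem.List.pyGetD_neg_one _ _ (by simp)]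
      rw [List.getLast_eq_getElem]
      simp
    rw [hb, hmin, hbestread, hval, hlast]
    rw [List.range_succ (n := i + 1), List.map_append]
    congr 1
    simp only [List.map_cons, List.map_nil]
    congr 1
    rw [F_succ_succ]
    rw [max_def]
    split_ifs <;> omega

-- ---- k passes of B's outer loop compute layer k ----
theorem layers_eq {evs : List (List Int)} (before : List Int)
    (hbefore : ∀ m : Nat, m < evs.length → before.getD m 0 = (Kc evs (stA evs m) : Int)) :
    ∀ j : Nat,
      ((PySem.List.pyRange 0 (j : Int) 1).foldl (fun best _ =>
          (PySem.List.pyRange 1 ((evs.length : Int) + 1) 1).foldl (fun nxt ii =>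
            nxt ++ [if PySem.List.pyGetD nxt (-1) 0 <
                PySem.List.pyGetD best (min (PySem.List.pyGetD before (ii - 1) 0) ii) 0 +
                  PySem.List.pyGetD (PySem.List.pyGetD evs (ii - 1) []) 2 0 then
                PySem.List.pyGetD best (min (PySem.List.pyGetD before (ii - 1) 0) ii) 0 +
                  PySem.List.pyGetD (PySem.List.pyGetD evs (ii - 1) []) 2 0
              else PySem.List.pyGetD nxt (-1) 0]) ([0] : List Int))
        ((PySem.List.pyRange 0 ((evs.length : Int) + 1) 1).map (fun _ => (0 : Int)))) =
      (List.range (evs.length + 1)).map (fun r => F evs r j) := by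
  intro j
  induction j with
  | zero =>
    rw [PySem.List.pyRange_one_eq_nil (a := 0) (b := ((0 : Nat) : Int)) (by omega)]
    rw [List.foldl_nil]
    rw [PySem.List.pyRange_one, List.map_map]
    simp only [F_zero_right]
    rw [show (((evs.length : Int) + 1 - 0).toNat) = evs.length + 1 by omega]
    simp [Function.comp_def]
  | succ j ih =>
    rw [show ((j + 1 : Nat) : Int) = ((j : Int) + 1) by push_cast; ring]
    rw [PySem.List.pyRange_one_succ_right (a := 0) (b := (j : Int)) (by omega)]
    rw [List.foldl_append, ih]
    simp only [List.foldl_cons, List.foldl_nil]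
    have := layer_step before ((List.range (evs.length + 1)).map (fun r => F evs r j)) j hbefore rfl
      evs.length le_rfl
    exact this


theorem getD_set_list {α : Type} (l : List α) (i m : Nat) (v d : α) (hi : i < l.length) :
    (l.set i v).getD m d = if m = i then v else l.getD m d := by
  by_cases h : m = i
  · subst h; simp [List.getD, hi]
  · rw [if_neg h, List.getD_eq_getElem?_getD, List.getD_eq_getElem?_getD,
      List.getElem?_set_ne (Ne.symm h)]

-- ---- A's inner loop fills row c+1 of the table ----
theorem row_fold {evs : List (List Int)} (k' c : Nat) (hc : c < evs.length) :
    ∀ (j' : Nat) (dp : List (List Int)),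
      j' ≤ k' →
      dp.length = evs.length + 1 →
      (∀ r : Nat, r ≤ evs.length → (dp.getD r []).length = k' + 1) →
      (∀ r jj : Nat, r ≤ evs.length → jj ≤ k' →
        (dp.getD r []).getD jj 0 = if r < c + 1 then F evs r jj else 0) →
      ∀ dp', dp' = (PySem.List.pyRange 1 ((j' : Int) + 1) 1).foldl (fun dp j =>
          PySem.List.pySetD dp ((c : Int) + 1) (PySem.List.pySetD (PySem.List.pyGetD dp ((c : Int) + 1) []) j
            (max (PySem.List.pyGetD (PySem.List.pyGetD dp ((c : Int)) []) j 0)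
                 (PySem.List.pyGetD (PySem.List.pyGetD dp ((pIdx evs c : Int)) []) (j - 1) 0 +
                   PySem.List.pyGetD (PySem.List.pyGetD evs ((c : Int)) []) 2 0)))) dp →
        dp'.length = evs.length + 1 ∧
        (∀ r : Nat, r ≤ evs.length → (dp'.getD r []).length = k' + 1) ∧
        (∀ r jj : Nat, r ≤ evs.length → jj ≤ k' →
          (dp'.getD r []).getD jj 0 =
            if r < c + 1 ∨ (r = c + 1 ∧ jj ≤ j') then F evs r jj else 0) := by
  intro j'
  induction j' with
  | zero =>
    intro dp _ hlen hrow hval dp' hdp'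
    rw [PySem.List.pyRange_one_eq_nil (a := 1) (b := ((0 : Nat) : Int) + 1) (by omega)] at hdp'
    rw [List.foldl_nil] at hdp'
    subst hdp'
    refine ⟨hlen, hrow, ?_⟩
    intro r jj hr hjj
    rw [hval r jj hr hjj]
    by_cases h1 : r < c + 1
    · simp [h1]
    · rw [if_neg h1]
      by_cases h2 : r = c + 1 ∧ jj ≤ 0
      · rw [if_pos (Or.inr h2), show jj = 0 by omega, F_zero_right]
      · rw [if_neg (by tauto)]
  | succ j' ih =>
    intro dp hj' hlen hrow hval dp' hdp'
    rw [show ((j' + 1 : Nat) : Int) + 1 = (((j' : Int) + 1) + 1) by push_cast; ring] at hdp'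
    rw [PySem.List.pyRange_one_succ_right (a := 1) (b := (j' : Int) + 1) (by omega)] at hdp'
    rw [List.foldl_append] at hdp'
    obtain ⟨hlenM, hrowM, hvalM⟩ := ih dp (by omega) hlen hrow hval _ rfl
    set dpM := (PySem.List.pyRange 1 ((j' : Int) + 1) 1).foldl _ dp with hdpM
    simp only [List.foldl_cons, List.foldl_nil] at hdp'
    have hP := pIdx_le evs c hc
    -- the reads
    have hskip : PySem.List.pyGetD (PySem.List.pyGetD dpM ((c : Int)) []) ((j' : Int) + 1) 0
        = F evs c (j' + 1) := by
      rw [pyGetD_nonneg dpM _ [] (by omega), Int.toNat_natCast]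
      rw [show ((j' : Int) + 1) = (((j' + 1 : Nat)) : Int) by push_cast; ring]
      rw [pyGetD_nonneg _ _ 0 (by omega), Int.toNat_natCast]
      rw [hvalM c (j' + 1) (by omega) (by omega)]
      simp
    have htake : PySem.List.pyGetD (PySem.List.pyGetD dpM ((pIdx evs c : Int)) []) ((j' : Int) + 1 - 1) 0
        = F evs (pIdx evs c) j' := by
      rw [show (j' : Int) + 1 - 1 = ((j' : Nat) : Int) by ring]
      rw [pyGetD_nonneg dpM _ [] (by omega), Int.toNat_natCast]
      rw [pyGetD_nonneg _ _ 0 (by omega), Int.toNat_natCast]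
      rw [hvalM (pIdx evs c) j' (by omega) (by omega)]
      by_cases hPc : pIdx evs c < c + 1
      · rw [if_pos (Or.inl hPc)]
      · rw [if_pos (Or.inr ⟨by omega, le_rfl⟩)]
    have hv : PySem.List.pyGetD (PySem.List.pyGetD evs ((c : Int)) []) 2 0 = vlA evs c := by
      rw [pyGetD_nonneg evs _ [] (by omega), Int.toNat_natCast]
      rw [pyGetD_nonneg _ 2 0 (by omega)]
      simp [vlA]
    rw [hskip, htake, hv] at hdp'
    have hFval : max (F evs c (j' + 1)) (F evs (pIdx evs c) j' + vlA evs c) = F evs (c + 1) (j' + 1) :=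
      (F_succ_succ evs c j').symm
    rw [hFval] at hdp'
    -- the write
    have hc1 : c + 1 < dpM.length := by omega
    rw [PySem.List.pySetD_of_nonneg _ _ (by omega)] at hdp'
    rw [pyGetD_nonneg dpM _ [] (by omega)] at hdp'
    rw [show ((c : Int) + 1).toNat = c + 1 by omega] at hdp'
    rw [PySem.List.pySetD_of_nonneg _ _ (by omega)] at hdp'
    rw [show ((j' : Int) + 1).toNat = j' + 1 by omega] at hdp'
    subst hdp'
    refine ⟨by simpa using hlenM, ?_, ?_⟩
    · intro r hr
      rw [getD_set_list _ _ _ _ _ hc1]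
      by_cases h : r = c + 1
      · rw [if_pos h, List.length_set]
        exact hrowM (c + 1) (by omega)
      · rw [if_neg h]
        exact hrowM r hr
    · intro r jj hr hjj
      rw [getD_set_list _ _ _ _ _ hc1]
      by_cases h : r = c + 1
      · subst h
        rw [if_pos rfl]
        have hrowlen := hrowM (c + 1) (by omega)
        have hsetlt : j' + 1 < (dpM.getD (c + 1) []).length := by omega
        by_cases h2 : jj = j' + 1
        · subst h2
          rw [getD_set_list _ _ _ _ _ hsetlt, if_pos rfl, if_pos (Or.inr ⟨rfl, le_rfl⟩)]
        · rw [getD_set_list _ _ _ _ _ hsetlt, if_neg h2, hvalM (c + 1) jj (by omega) hjj]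
          by_cases h3 : jj ≤ j'
          · rw [if_pos (Or.inr ⟨rfl, h3⟩), if_pos (Or.inr ⟨rfl, by omega⟩)]
          · rw [if_neg (by omega), if_neg (by omega)]
      · rw [if_neg h]
        rw [hvalM r jj hr hjj]
        by_cases h1 : r < c + 1
        · rw [if_pos (Or.inl h1), if_pos (Or.inl h1)]
        · rw [if_neg (by tauto), if_neg (by tauto)]


theorem F_zero_left (evs : List (List Int)) (j : Nat) : F evs 0 j = 0 := by
  simp [F]

theorem map_const_getD {α β : Type} (l : List α) (b : β) (n : Nat) :
    (l.map (fun _ => b)).getD n b = b := by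
  rw [List.getD_eq_getElem?_getD, List.getElem?_map]
  cases l[n]? <;> simp

theorem map_const_getD' {α β : Type} (l : List α) (b : β) (n : Nat) (d : β) (hn : n < l.length) :
    (l.map (fun _ => b)).getD n d = b := by
  rw [List.getD_eq_getElem _ _ (by simpa using hn), List.getElem_map]

-- ---- A's outer loop fills the table row by row ----
theorem table_fold {evs : List (List Int)} (hmono : EndMono evs) (k' : Nat) :
    ∀ i : Nat, i ≤ evs.length →
      ∀ dp', dp' = (PySem.List.pyRange 1 ((i : Int) + 1) 1).foldl (fun dp ii =>
          (PySem.List.pyRange 1 ((k' : Int) + 1) 1).foldl (fun dp j =>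
            PySem.List.pySetD dp ii (PySem.List.pySetD (PySem.List.pyGetD dp ii []) j
              (max (PySem.List.pyGetD (PySem.List.pyGetD dp (ii - 1) []) j 0)
                   (PySem.List.pyGetD (PySem.List.pyGetD dp (binarySearchLeft evs (ii - 1) + 1) []) (j - 1) 0 +
                     PySem.List.pyGetD (PySem.List.pyGetD evs (ii - 1) []) 2 0)))) dp)
        ((PySem.List.pyRange 0 ((evs.length : Int) + 1) 1).map
          (fun _ => (PySem.List.pyRange 0 ((k' : Int) + 1) 1).map (fun _ => (0 : Int)))) →
      dp'.length = evs.length + 1 ∧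
      (∀ r : Nat, r ≤ evs.length → (dp'.getD r []).length = k' + 1) ∧
      (∀ r jj : Nat, r ≤ evs.length → jj ≤ k' →
        (dp'.getD r []).getD jj 0 = if r ≤ i then F evs r jj else 0) := by
  intro i
  induction i with
  | zero =>
    intro _ dp' hdp'
    rw [PySem.List.pyRange_one_eq_nil (a := 1) (b := ((0 : Nat) : Int) + 1) (by omega)] at hdp'
    rw [List.foldl_nil] at hdp'
    subst hdp'
    have hlenmap : ((PySem.List.pyRange 0 ((evs.length : Int) + 1) 1).map
        (fun _ => (PySem.List.pyRange 0 ((k' : Int) + 1) 1).map (fun _ => (0 : Int)))).length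
        = evs.length + 1 := by
      rw [List.length_map, PySem.List.length_pyRange_one]
      omega
    refine ⟨hlenmap, ?_, ?_⟩
    · intro r hr
      rw [map_const_getD' _ _ _ _ (by rw [PySem.List.length_pyRange_one]; omega),
        List.length_map, PySem.List.length_pyRange_one]
      omega
    · intro r jj hr hjj
      rw [map_const_getD' _ _ _ _ (by rw [PySem.List.length_pyRange_one]; omega), map_const_getD]
      by_cases h : r ≤ 0
      · rw [if_pos h, show r = 0 by omega, F_zero_left]
      · rw [if_neg h]
  | succ i ih =>
    intro hle dp' hdp'
    rw [show ((i + 1 : Nat) : Int) + 1 = (((i : Int) + 1) + 1) by push_cast; ring] at hdp'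
    rw [PySem.List.pyRange_one_succ_right (a := 1) (b := (i : Int) + 1) (by omega)] at hdp'
    rw [List.foldl_append] at hdp'
    obtain ⟨hlenP, hrowP, hvalP⟩ := ih (by omega) _ rfl
    set dpP := (PySem.List.pyRange 1 ((i : Int) + 1) 1).foldl _ _ with hdpP
    simp only [List.foldl_cons, List.foldl_nil] at hdp'
    rw [show ((i : Int) + 1 - 1) = ((i : Nat) : Int) by ring] at hdp'
    rw [binarySearchLeft_eq hmono i (by omega)] at hdp'
    rw [show ((pIdx evs i : Int) - 1 + 1) = ((pIdx evs i : Nat) : Int) by ring] at hdp'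
    obtain ⟨hlen', hrow', hval'⟩ := row_fold k' i (by omega) k' dpP le_rfl hlenP hrowP
      (fun r jj hr hjj => by
        rw [hvalP r jj hr hjj]
        by_cases h : r ≤ i
        · rw [if_pos h, if_pos (by omega)]
        · rw [if_neg h, if_neg (by omega)]) dp' hdp'
    refine ⟨hlen', hrow', ?_⟩
    intro r jj hr hjj
    rw [hval' r jj hr hjj]
    by_cases h : r ≤ i + 1
    · rw [if_pos h, if_pos (by omega)]
    · rw [if_neg h, if_neg (by omega)]


-- ---- the `before` component of B's sweep, characterised ----
theorem before_spec {evs : List (List Int)} (hmono : EndMono evs) :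
    ∀ m : Nat, m < evs.length →
      ((PySem.List.sorted (PySem.List.pyRange 0 ((evs.length : Int)) 1)
          (fun i => PySem.List.pyGetD (PySem.List.pyGetD evs i []) 0 0) false).foldl
        (fun (st : List Int × Int) i =>
          (PySem.List.pySetD st.1 i (sweepWhile (evs.map (fun e => PySem.List.pyGetD e 1 0))
              (PySem.List.pyGetD (PySem.List.pyGetD evs i []) 0 0) ((evs.length : Int)) st.2),
           sweepWhile (evs.map (fun e => PySem.List.pyGetD e 1 0))
              (PySem.List.pyGetD (PySem.List.pyGetD evs i []) 0 0) ((evs.length : Int)) st.2))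
        ((PySem.List.pyRange 0 ((evs.length : Int)) 1).map (fun _ => (0 : Int)), 0)).1.getD m 0
      = (Kc evs (stA evs m) : Int) := by
  intro m hm
  have hmemb : ∀ j ∈ PySem.List.sorted (PySem.List.pyRange 0 ((evs.length : Int)) 1)
      (fun i => PySem.List.pyGetD (PySem.List.pyGetD evs i []) 0 0) false,
      0 ≤ j ∧ j < (evs.length : Int) := by
    intro j hj
    rw [PySem.List.mem_sorted] at hj
    exact (PySem.List.mem_pyRange_one).mp hj
  have hpair := PySem.List.sorted_pairwise (PySem.List.pyRange 0 ((evs.length : Int)) 1)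
    (fun i => PySem.List.pyGetD (PySem.List.pyGetD evs i []) 0 0)
  have hpair' : (PySem.List.sorted (PySem.List.pyRange 0 ((evs.length : Int)) 1)
      (fun i => PySem.List.pyGetD (PySem.List.pyGetD evs i []) 0 0) false).Pairwise
      (fun a b => stA evs a.toNat ≤ stA evs b.toNat) := by
    refine hpair.imp_of_mem ?_
    intro a b ha hb hab
    have ha0 := (hmemb a ha).1
    have hb0 := (hmemb b hb).1
    rwa [pyGetD_nonneg evs a [] ha0, pyGetD_nonneg evs b [] hb0,
      PySem.List.pyGetD_zero, PySem.List.pyGetD_zero] at hab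
  have := sweep_fold hmono rfl rfl
    (PySem.List.sorted (PySem.List.pyRange 0 ((evs.length : Int)) 1)
      (fun i => PySem.List.pyGetD (PySem.List.pyGetD evs i []) 0 0) false)
    ((PySem.List.pyRange 0 ((evs.length : Int)) 1).map (fun _ => (0 : Int))) 0
    (by rw [List.length_map, PySem.List.length_pyRange_one]; omega)
    hmemb hpair' le_rfl (fun j _ => by omega) m hm
  rw [this]
  rw [if_pos (by
    rw [PySem.List.mem_sorted, PySem.List.mem_pyRange_one]
    omega)]

-- ---- both programs compute F evs n k' on the sorted list ----
theorem assemble {evs : List (List Int)} (hmono : EndMono evs) (k' : Nat) :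
    PySem.List.pyGetD (PySem.List.pyGetD
      ((PySem.List.pyRange 1 ((evs.length : Int) + 1) 1).foldl (fun dp i =>
        (PySem.List.pyRange 1 (((k' : Nat) : Int) + 1) 1).foldl (fun dp j =>
          PySem.List.pySetD dp i (PySem.List.pySetD (PySem.List.pyGetD dp i []) j
            (max (PySem.List.pyGetD (PySem.List.pyGetD dp (i - 1) []) j 0)
                 (PySem.List.pyGetD (PySem.List.pyGetD dp (binarySearchLeft evs (i - 1) + 1) []) (j - 1) 0 +
                   PySem.List.pyGetD (PySem.List.pyGetD evs (i - 1) []) 2 0)))) dp)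
        ((PySem.List.pyRange 0 ((evs.length : Int) + 1) 1).map
          (fun _ => (PySem.List.pyRange 0 (((k' : Nat) : Int) + 1) 1).map (fun _ => (0 : Int)))))
      ((evs.length : Int)) []) (((k' : Nat) : Int)) 0
    =
    PySem.List.pyGetD
      ((PySem.List.pyRange 0 (((k' : Nat) : Int)) 1).foldl (fun best _ =>
        (PySem.List.pyRange 1 ((evs.length : Int) + 1) 1).foldl (fun nxt i =>
          nxt ++ [if PySem.List.pyGetD nxt (-1) 0 <
              PySem.List.pyGetD best (min (PySem.List.pyGetD
                (((PySem.List.sorted (PySem.List.pyRange 0 ((evs.length : Int)) 1)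
                    (fun i => PySem.List.pyGetD (PySem.List.pyGetD evs i []) 0 0) false).foldl
                  (fun (st : List Int × Int) i =>
                    (PySem.List.pySetD st.1 i (sweepWhile (evs.map (fun e => PySem.List.pyGetD e 1 0))
                        (PySem.List.pyGetD (PySem.List.pyGetD evs i []) 0 0) ((evs.length : Int)) st.2),
                     sweepWhile (evs.map (fun e => PySem.List.pyGetD e 1 0))
                        (PySem.List.pyGetD (PySem.List.pyGetD evs i []) 0 0) ((evs.length : Int)) st.2))
                  ((PySem.List.pyRange 0 ((evs.length : Int)) 1).map (fun _ => (0 : Int)), 0)).1)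
                (i - 1) 0) i) 0 +
                PySem.List.pyGetD (PySem.List.pyGetD evs (i - 1) []) 2 0 then
              PySem.List.pyGetD best (min (PySem.List.pyGetD
                (((PySem.List.sorted (PySem.List.pyRange 0 ((evs.length : Int)) 1)
                    (fun i => PySem.List.pyGetD (PySem.List.pyGetD evs i []) 0 0) false).foldl
                  (fun (st : List Int × Int) i =>
                    (PySem.List.pySetD st.1 i (sweepWhile (evs.map (fun e => PySem.List.pyGetD e 1 0))
                        (PySem.List.pyGetD (PySem.List.pyGetD evs i []) 0 0) ((evs.length : Int)) st.2),
                     sweepWhile (evs.map (fun e => PySem.List.pyGetD e 1 0))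
                        (PySem.List.pyGetD (PySem.List.pyGetD evs i []) 0 0) ((evs.length : Int)) st.2))
                  ((PySem.List.pyRange 0 ((evs.length : Int)) 1).map (fun _ => (0 : Int)), 0)).1)
                (i - 1) 0) i) 0 +
                PySem.List.pyGetD (PySem.List.pyGetD evs (i - 1) []) 2 0
            else PySem.List.pyGetD nxt (-1) 0]) ([0] : List Int))
        ((PySem.List.pyRange 0 ((evs.length : Int) + 1) 1).map (fun _ => (0 : Int))))
      ((evs.length : Int)) 0 := by
  rw [layers_eq _ (before_spec hmono) k']
  obtain ⟨hL, hRow, hVal⟩ := table_fold hmono k' evs.length le_rfl _ rfl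
  rw [pyGetD_nonneg _ (((k' : Nat) : Int)) 0 (by omega), Int.toNat_natCast]
  rw [pyGetD_nonneg _ ((evs.length : Int)) ([] : List Int) (by omega), Int.toNat_natCast]
  rw [hVal evs.length k' le_rfl le_rfl, if_pos le_rfl]
  rw [pyGetD_nonneg _ ((evs.length : Int)) 0 (by omega), Int.toNat_natCast]
  rw [PySem.List.getD_map_range _ _ _ _ (by omega)]

theorem q1751_spec : Claim_equal_q1751 := by
  intro events k _ hpre
  obtain ⟨hk, -, -⟩ := hpre
  unfold Spec_q1751 q1751 q1751_alt
  obtain ⟨k', rfl⟩ : ∃ k' : Nat, k = (k' : Int) := ⟨k.toNat, by omega⟩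
  rw [show events.length
      = (PySem.List.sorted events (fun x => PySem.List.pyGetD x 1 0) false).length
    from (PySem.List.length_sorted _ _ _).symm]
  exact assemble (endMono_sorted events) k'
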